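-- pv_equiv track=rewrite | github.com/khunsaker/ontology-doc | render_one.py | pick_level_label
-- ===== SOURCE A (Python) =====
-- NEVER_COLLAPSE_TO = {"SharkNode", "AirSystem", "_Bloom_Perspective_"}
--
-- def pick_level_label(labels):
--     """
--     Choose a single representative label for a node when collapsing.
--
--     Rules:
--       1) If any core level label present, return it (Hub/Category/Kind/Family).
--       2) Otherwise return first match in SECONDARY_PRIORITY.
--       3) Otherwise return first non-NEVER_COLLAPSE_TO label alphabetically.
--       4) Fallback: 'Unknown'
--     """
--     label_set = set(labels or [])
--
--     # 1) Core levels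
--     for core in ["Hub", "Category", "Kind", "Family"]:
--         if core in label_set:
--             return core
--
--     # 2) Secondary priority list (NO underscore labels, NO AirSystem)
--     SECONDARY_PRIORITY = [
--         # Air chain (preferred collapsed labels)
--         "AirType",
--         "AirSubType",
--         "AirVariant",
--         "AirSubVariant",
--         "AirModel",
--         "AirSubModel",
--         "AirInstance",
--
--         # Maritime chain (preferred collapsed labels)
--         "ShipType",
--         "ShipSubType",
--         "ShipVariant",
--         "ShipClass",
--         "ShipSubClass",
--         "ShipInstance",
--
--         # Other chains
--         "Place",
--         "Organization",
--         "Weapon",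
--
--         # Common geo levels (if used in your ontology)
--         "Continent",
--         "Country",
--         "Region",
--         "City",
--     ]
--     for lab in SECONDARY_PRIORITY:
--         if lab in label_set:
--             return lab
--
--     # 3) Fallback: first label alphabetically excluding banned labels
--     candidates = sorted([l for l in label_set if l not in NEVER_COLLAPSE_TO])
--     return candidates[0] if candidates else "Unknown"
-- ===== SOURCE B (Python) =====
-- NEVER_COLLAPSE_TO = {"SharkNode", "AirSystem", "_Bloom_Perspective_"}
--
-- _PRIORITY = [
--     "Hub", "Category", "Kind", "Family",
--     "AirType", "AirSubType", "AirVariant", "AirSubVariant",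
--     "AirModel", "AirSubModel", "AirInstance",
--     "ShipType", "ShipSubType", "ShipVariant", "ShipClass",
--     "ShipSubClass", "ShipInstance",
--     "Place", "Organization", "Weapon",
--     "Continent", "Country", "Region", "City",
-- ]
-- _RANK = {lab: i for i, lab in enumerate(_PRIORITY)}
--
--
-- def pick_level_label(labels):
--     best = None
--     for lab in (labels or []):
--         r = _RANK.get(lab)
--         if r is not None and (best is None or r < best[0]):
--             best = (r, lab)
--     if best is not None:
--         return best[1]
--     candidates = sorted(l for l in set(labels or []) if l not in NEVER_COLLAPSE_TO)
--     return candidates[0] if candidates else "Unknown"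
-- ===== Notes on version B (the rewrite author's own statement) =====
-- stated objective: alternative
-- what changed: Replaces A's two ordered scans of the core and secondary priority lists against a membership set by a single precomputed label->rank dictionary and one pass over the input labels keeping the minimum-rank hit; the alphabetical fallback is unchanged.
import Mathlib
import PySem

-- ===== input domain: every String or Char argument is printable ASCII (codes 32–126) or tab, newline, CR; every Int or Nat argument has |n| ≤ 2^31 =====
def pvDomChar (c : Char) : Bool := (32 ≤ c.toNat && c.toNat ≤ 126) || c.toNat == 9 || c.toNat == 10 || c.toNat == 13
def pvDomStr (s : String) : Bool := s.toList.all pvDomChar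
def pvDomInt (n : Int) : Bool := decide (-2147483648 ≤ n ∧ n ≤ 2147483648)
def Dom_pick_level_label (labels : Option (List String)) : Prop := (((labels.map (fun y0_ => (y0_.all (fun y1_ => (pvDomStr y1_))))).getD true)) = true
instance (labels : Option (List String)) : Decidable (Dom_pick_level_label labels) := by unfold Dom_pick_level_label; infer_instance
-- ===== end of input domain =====

-- B replaces A's two ordered priority scans over a membership set by a rank table (priority label → rank)
-- and a single pass over the input labels keeping the minimum-rank hit; same fallback. Objective: alternative.

-- ===== PORT A =====
def pvNeverCollapseTo : PySem.Set String :=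
  PySem.Set.ofList ["SharkNode", "AirSystem", "_Bloom_Perspective_"]

def pvCoreLevels : List String := ["Hub", "Category", "Kind", "Family"]

def pvSecondaryPriority : List String :=
  ["AirType", "AirSubType", "AirVariant", "AirSubVariant", "AirModel", "AirSubModel",
   "AirInstance",
   "ShipType", "ShipSubType", "ShipVariant", "ShipClass", "ShipSubClass", "ShipInstance",
   "Place", "Organization", "Weapon",
   "Continent", "Country", "Region", "City"]

-- 'for lab in P: if lab in label_set: return lab' as structural recursion over P
def pvScanFirst : List String → PySem.Set String → Option String
  | [], _ => none
  | c :: rest, s => if PySem.Set.contains s c then some c else pvScanFirst rest s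

def pick_level_label (labels : Option (List String)) : String :=
  let label_set : PySem.Set String := PySem.Set.ofList (labels.getD [])
  match pvScanFirst pvCoreLevels label_set with
  | some core => core
  | none =>
    match pvScanFirst pvSecondaryPriority label_set with
    | some lab => lab
    | none =>
      let candidates :=
        PySem.List.sorted (label_set.filter (fun l => !(PySem.Set.contains pvNeverCollapseTo l)))
          (fun x => x) false
      match candidates with
      | c :: _ => c
      | [] => "Unknown"

-- ===== PORT B =====
def pvPriority : List String :=
  ["Hub", "Category", "Kind", "Family",
   "AirType", "AirSubType", "AirVariant", "AirSubVariant", "AirModel", "AirSubModel",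
   "AirInstance",
   "ShipType", "ShipSubType", "ShipVariant", "ShipClass", "ShipSubClass", "ShipInstance",
   "Place", "Organization", "Weapon",
   "Continent", "Country", "Region", "City"]

-- _RANK = {lab: i for i, lab in enumerate(_PRIORITY)}
def pvRank : PySem.Dict String Int :=
  PySem.Dict.ofList ((PySem.List.enumerate pvPriority).map (fun p => (p.2, p.1)))

-- the body of B's single loop: keep the (rank, label) pair with the smallest rank
def pvStep (best : Option (Int × String)) (lab : String) : Option (Int × String) :=
  match pvRank.get? lab with
  | none => best
  | some r =>
    match best with
    | none => some (r, lab)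
    | some (r0, l0) => if r < r0 then some (r, lab) else some (r0, l0)

def pick_level_label_alt (labels : Option (List String)) : String :=
  let xs := labels.getD []
  match xs.foldl pvStep none with
  | some (_, lab) => lab
  | none =>
    let candidates :=
      PySem.List.sorted
        ((PySem.Set.ofList xs).filter (fun l => !(PySem.Set.contains pvNeverCollapseTo l)))
        (fun x => x) false
    match candidates with
    | c :: _ => c
    | [] => "Unknown"

-- ===== PRECONDITION & SPEC =====
def Spec_pick_level_label (labels : Option (List String)) (out : String) : Prop := out = pick_level_label_alt labels
instance (labels : Option (List String)) (out : String) : Decidable (Spec_pick_level_label labels out) := by unfold Spec_pick_level_label; infer_instance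

-- ===== CLAIM (what is proved, stated in full; the proofs are below) =====
def Claim_equal_pick_level_label : Prop := ∀ (labels : Option (List String)), Dom_pick_level_label labels → Spec_pick_level_label labels (pick_level_label labels)

-- ===== LEMMAS AND PROOFS =====

-- generic step over an arbitrary rank dictionary (pvStep = pvStepD pvRank)
def pvStepD (d : PySem.Dict String Int) (best : Option (Int × String)) (lab : String) :
    Option (Int × String) :=
  match d.get? lab with
  | none => best
  | some r =>
    match best with
    | none => some (r, lab)
    | some (r0, l0) => if r < r0 then some (r, lab) else some (r0, l0)

theorem pvStep_eq_stepD : pvStep = pvStepD pvRank := rfl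

-- if no label of xs is ranked, the fold keeps its accumulator
theorem pvFold_none (d : PySem.Dict String Int) :
    ∀ (xs : List String) (acc : Option (Int × String)),
      (∀ x ∈ xs, d.get? x = none) → xs.foldl (pvStepD d) acc = acc := by
  intro xs
  induction xs with
  | nil => intro acc _; rfl
  | cons x xs ih =>
    intro acc h
    simp only [List.foldl_cons]
    have hx : d.get? x = none := h x (by simp)
    have hstep : pvStepD d acc x = acc := by simp [pvStepD, hx]
    rw [hstep]
    exact ih acc (fun y hy => h y (by simp [hy]))

-- once the accumulator holds a rank minimal among all ranks in xs, it never changes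
theorem pvFold_keep (d : PySem.Dict String Int) (v : Int) (k : String) :
    ∀ (xs : List String),
      (∀ x ∈ xs, ∀ r, d.get? x = some r → v ≤ r) →
      xs.foldl (pvStepD d) (some (v, k)) = some (v, k) := by
  intro xs
  induction xs with
  | nil => intro _; rfl
  | cons x xs ih =>
    intro h
    simp only [List.foldl_cons]
    have hstep : pvStepD d (some (v, k)) x = some (v, k) := by
      unfold pvStepD
      cases hx : d.get? x with
      | none => rfl
      | some r =>
        have : v ≤ r := h x (by simp) r hx
        simp [show ¬ (r < v) by omega]
    rw [hstep]
    exact ih (fun y hy r hr => h y (by simp [hy]) r hr)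

-- acceptable accumulator states while (v, k) is the strict winner
def pvAccOk (v : Int) (k : String) (acc : Option (Int × String)) : Prop :=
  acc = none ∨ acc = some (v, k) ∨ ∃ r0 l0, acc = some (r0, l0) ∧ v < r0

-- if k ∈ xs, d.get? k = some v and v is (strictly, except at k) below every rank in xs, the fold returns (v, k)
theorem pvFold_win (d : PySem.Dict String Int) (v : Int) (k : String) :
    ∀ (xs : List String) (acc : Option (Int × String)),
      k ∈ xs →
      d.get? k = some v →
      (∀ x ∈ xs, ∀ r, d.get? x = some r → v ≤ r ∧ (r = v → x = k)) →
      pvAccOk v k acc →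
      xs.foldl (pvStepD d) acc = some (v, k) := by
  intro xs
  induction xs with
  | nil => intro acc h; exact absurd h (by simp)
  | cons x xs ih =>
    intro acc hk hdk hmin hacc
    simp only [List.foldl_cons]
    by_cases hxk : x = k
    · subst hxk
      have hstep : pvStepD d acc x = some (v, x) := by
        unfold pvStepD
        rw [hdk]
        rcases hacc with h | h | ⟨r0, l0, h, hlt⟩ <;> subst h
        · rfl
        · simp
        · simp [hlt]
      rw [hstep]
      exact pvFold_keep d v x xs
        (fun y hy r hr => (hmin y (by simp [hy]) r hr).1)
    · have hk' : k ∈ xs := by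
        rcases List.mem_cons.mp hk with h | h
        · exact absurd h.symm hxk
        · exact h
      have hacc' : pvAccOk v k (pvStepD d acc x) := by
        unfold pvStepD
        cases hx : d.get? x with
        | none => exact hacc
        | some r =>
          have hr := hmin x (by simp) r hx
          have hvr : v < r := by
            rcases lt_or_eq_of_le hr.1 with h | h
            · exact h
            · exact absurd (hr.2 h.symm) hxk
          rcases hacc with h | h | ⟨r0, l0, h, hlt⟩ <;> subst h
          · exact Or.inr (Or.inr ⟨r, x, rfl, hvr⟩)
          · simp [show ¬ (r < v) by omega, pvAccOk]
          · by_cases hrr : r < r0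
            · simp only [if_pos hrr]
              exact Or.inr (Or.inr ⟨r, x, rfl, hvr⟩)
            · simp only [if_neg hrr]
              exact Or.inr (Or.inr ⟨r0, l0, rfl, hlt⟩)
      exact ih (pvStepD d acc x) hk' hdk
        (fun y hy r hr => hmin y (by simp [hy]) r hr) hacc'

-- a successful lookup names a pair of the underlying association list
theorem pvGet?_mem (ps : List (String × Int)) (x : String) (r : Int) :
    (PySem.Dict.mk ps).get? x = some r → (x, r) ∈ ps := by
  induction ps with
  | nil => intro h; simp [PySem.Dict.get?] at h
  | cons p ps ih =>
    intro h
    rw [show (PySem.Dict.mk (p :: ps)) = PySem.Dict.mk ((p.1, p.2) :: ps) by rfl,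
      PySem.Dict.get?_mk_cons] at h
    by_cases hpx : p.1 = x
    · simp [hpx] at h
      subst hpx h
      simp
    · rw [if_neg (by simpa using hpx)] at h
      exact List.mem_cons_of_mem _ (ih h)

-- the fold over xs with ranks ps computes: first key of ps that occurs in xs
theorem pvFold_eq_find (ps : List (String × Int)) :
    ps.Pairwise (fun a b => a.2 < b.2) →
    (ps.map Prod.fst).Nodup →
    ∀ xs : List String,
      (xs.foldl (pvStepD (PySem.Dict.mk ps)) none).map Prod.snd =
        (ps.map Prod.fst).find? (fun c => decide (c ∈ xs)) := by
  induction ps with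
  | nil =>
    intro _ _ xs
    rw [pvFold_none _ xs none (fun x _ => by simp [PySem.Dict.get?])]
    rfl
  | cons p ps ih =>
    intro hpw hnd xs
    obtain ⟨k, v⟩ := p
    have hpw' := (List.pairwise_cons.mp hpw).2
    have hvlt : ∀ q ∈ ps, v < q.2 := (List.pairwise_cons.mp hpw).1
    rw [List.map_cons] at hnd
    have hnd' := (List.nodup_cons.mp hnd).2
    have hknot : k ∉ ps.map Prod.fst := (List.nodup_cons.mp hnd).1
    by_cases hk : k ∈ xs
    · have hget : (PySem.Dict.mk ((k, v) :: ps)).get? k = some v := by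
        rw [PySem.Dict.get?_mk_cons]; simp
      have hmin : ∀ x ∈ xs, ∀ r,
          (PySem.Dict.mk ((k, v) :: ps)).get? x = some r → v ≤ r ∧ (r = v → x = k) := by
        intro x _ r hr
        by_cases hxk : x = k
        · subst hxk
          rw [hget] at hr
          exact ⟨le_of_eq (Option.some.inj hr), fun _ => rfl⟩
        · rw [PySem.Dict.get?_mk_cons, if_neg (by simpa using (Ne.symm hxk))] at hr
          have hmem := pvGet?_mem ps x r hr
          have := hvlt (x, r) hmem
          exact ⟨le_of_lt this, fun h => absurd (h ▸ this) (by omega)⟩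
      rw [pvFold_win (PySem.Dict.mk ((k, v) :: ps)) v k xs none hk hget hmin (Or.inl rfl)]
      simp [hk]
    · have hagree : ∀ x ∈ xs,
          (PySem.Dict.mk ((k, v) :: ps)).get? x = (PySem.Dict.mk ps).get? x := by
        intro x hx
        have hxk : x ≠ k := fun h => hk (h ▸ hx)
        rw [PySem.Dict.get?_mk_cons, if_neg (by simpa using (Ne.symm hxk))]
      have hfold : xs.foldl (pvStepD (PySem.Dict.mk ((k, v) :: ps))) none =
          xs.foldl (pvStepD (PySem.Dict.mk ps)) none := by
        apply PySem.List.foldl_congr_mem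
        intro acc x hx
        unfold pvStepD
        rw [hagree x hx]
      rw [hfold, ih hpw' hnd' xs]
      simp [hk]

-- A's scan over P is find? over P with the set-membership predicate
theorem pvScanFirst_eq_find (P : List String) (s : PySem.Set String) :
    pvScanFirst P s = P.find? (fun c => PySem.Set.contains s c) := by
  induction P with
  | nil => rfl
  | cons c P ih =>
    simp only [pvScanFirst, List.find?]
    cases h : PySem.Set.contains s c with
    | true => simp
    | false => simp [ih]

-- the concrete instantiation: B's fold computes A's two chained scans
theorem pvFold_eq_scans (xs : List String) :
    (xs.foldl pvStep none).map Prod.snd =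
      (pvCoreLevels ++ pvSecondaryPriority).find?
        (fun c => PySem.Set.contains (PySem.Set.ofList xs) c) := by
  have hps : pvRank = PySem.Dict.mk
      [("Hub", 0), ("Category", 1), ("Kind", 2), ("Family", 3),
       ("AirType", 4), ("AirSubType", 5), ("AirVariant", 6), ("AirSubVariant", 7),
       ("AirModel", 8), ("AirSubModel", 9), ("AirInstance", 10),
       ("ShipType", 11), ("ShipSubType", 12), ("ShipVariant", 13), ("ShipClass", 14),
       ("ShipSubClass", 15), ("ShipInstance", 16),
       ("Place", 17), ("Organization", 18), ("Weapon", 19),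
       ("Continent", 20), ("Country", 21), ("Region", 22), ("City", 23)] := by decide
  rw [pvStep_eq_stepD, hps,
    pvFold_eq_find _ (by decide) (by decide) xs]
  have hkeys : ([("Hub", (0:Int)), ("Category", 1), ("Kind", 2), ("Family", 3),
       ("AirType", 4), ("AirSubType", 5), ("AirVariant", 6), ("AirSubVariant", 7),
       ("AirModel", 8), ("AirSubModel", 9), ("AirInstance", 10),
       ("ShipType", 11), ("ShipSubType", 12), ("ShipVariant", 13), ("ShipClass", 14),
       ("ShipSubClass", 15), ("ShipInstance", 16),
       ("Place", 17), ("Organization", 18), ("Weapon", 19),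
       ("Continent", 20), ("Country", 21), ("Region", 22), ("City", 23)].map Prod.fst)
      = pvCoreLevels ++ pvSecondaryPriority := by decide
  rw [hkeys]
  have hpred : (fun c => PySem.Set.contains (PySem.Set.ofList xs) c)
      = (fun c => decide (c ∈ xs)) := by
    funext c
    rw [PySem.Set.contains_eq_decide]
    simp [PySem.Set.mem_ofList]
  rw [hpred]

-- ===== VERDICT (by name: the statement is the Claim_ definition above) =====
theorem pick_level_label_spec : Claim_equal_pick_level_label := by
  intro labels _
  unfold Spec_pick_level_label
  simp only [pick_level_label, pick_level_label_alt]
  set xs : List String := labels.getD [] with hxs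
  have hmain := pvFold_eq_scans xs
  rw [pvScanFirst_eq_find, pvScanFirst_eq_find]
  rw [List.find?_append] at hmain
  cases hfold : xs.foldl pvStep none with
  | none =>
    rw [hfold] at hmain
    simp only [Option.map_none] at hmain
    have h1 : pvCoreLevels.find? (fun c => PySem.Set.contains (PySem.Set.ofList xs) c) = none := by
      cases h : pvCoreLevels.find? (fun c => PySem.Set.contains (PySem.Set.ofList xs) c) with
      | none => rfl
      | some c => rw [h] at hmain; simp at hmain
    have h2 : pvSecondaryPriority.find? (fun c => PySem.Set.contains (PySem.Set.ofList xs) c) = none := by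
      rw [h1] at hmain
      simpa using hmain.symm
    rw [h1, h2]
  | some p =>
    obtain ⟨r, l⟩ := p
    rw [hfold] at hmain
    simp only [Option.map_some] at hmain
    cases h1 : pvCoreLevels.find? (fun c => PySem.Set.contains (PySem.Set.ofList xs) c) with
    | some c =>
      rw [h1] at hmain
      simp at hmain
      simp [hmain]
    | none =>
      rw [h1] at hmain
      simp only [Option.none_or] at hmain
      cases h2 : pvSecondaryPriority.find? (fun c => PySem.Set.contains (PySem.Set.ofList xs) c) with
      | some c =>
        rw [h2] at hmain
        simp at hmain
        simp [hmain]
      | none =>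
        rw [h2] at hmain
        exact absurd hmain (by simp)
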